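-- pv_equiv track=rewrite | github.com/renzorico/ds-radar | scripts/generate_pdf.py | reorder_projects_for_archetype
-- ===== SOURCE A (Python) =====
-- ARCHETYPE_PROJECT_ORDER: dict[str, list[str]] = {
--     "ds-product":         ["legalize-co", "London Bible", "UN Speeches", "No botes", "ADCC", "ds-radar"],
--     "data-analyst":       ["London Bible", "No botes", "UN Speeches", "legalize-co", "ds-radar", "ADCC"],
--     "ml-engineer":        ["ds-radar", "legalize-co", "UN Speeches", "London Bible", "ADCC", "No botes"],
--     "analytics-engineer": ["London Bible", "legalize-co", "UN Speeches", "ADCC", "No botes", "ds-radar"],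
--     "data-engineer":      ["legalize-co", "ds-radar", "No botes", "UN Speeches", "London Bible", "ADCC"],
--     "ai-engineer":        ["ds-radar", "legalize-co", "UN Speeches", "ADCC", "No botes", "London Bible"],
-- }
--
-- def reorder_projects_for_archetype(projects: list, archetype: str) -> list:
--     """Reorder project list so archetype-preferred projects appear first.
--
--     Projects not matching any slug keep their original relative order at the end.
--     """
--     order = ARCHETYPE_PROJECT_ORDER.get(archetype, ARCHETYPE_PROJECT_ORDER["ds-product"])
--     slugs = [s.lower() for s in order]
--
--     def rank(p: str) -> int:
--         p_lower = p.lower()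
--         for i, slug in enumerate(slugs):
--             if slug.lower() in p_lower:
--                 return i
--         return len(slugs)
--
--     return sorted(projects, key=rank)
-- ===== SOURCE B (Python) =====
-- ARCHETYPE_PROJECT_ORDER: dict[str, list[str]] = {
--     "ds-product":         ["legalize-co", "London Bible", "UN Speeches", "No botes", "ADCC", "ds-radar"],
--     "data-analyst":       ["London Bible", "No botes", "UN Speeches", "legalize-co", "ds-radar", "ADCC"],
--     "ml-engineer":        ["ds-radar", "legalize-co", "UN Speeches", "London Bible", "ADCC", "No botes"],
--     "analytics-engineer": ["London Bible", "legalize-co", "UN Speeches", "ADCC", "No botes", "ds-radar"],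
--     "data-engineer":      ["legalize-co", "ds-radar", "No botes", "UN Speeches", "London Bible", "ADCC"],
--     "ai-engineer":        ["ds-radar", "legalize-co", "UN Speeches", "ADCC", "No botes", "London Bible"],
-- }
--
-- def reorder_projects_for_archetype(projects: list, archetype: str) -> list:
--     """Stable successive partition: peel off the matches slug by slug; no rank function, no sort."""
--     order = ARCHETYPE_PROJECT_ORDER.get(archetype, ARCHETYPE_PROJECT_ORDER["ds-product"])
--     result = []
--     remaining = list(projects)
--     for slug in order:
--         s = slug.lower()
--         matched = [p for p in remaining if s in p.lower()]
--         remaining = [p for p in remaining if s not in p.lower()]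
--         result.extend(matched)
--     return result + remaining
-- ===== Notes on version B (the rewrite author's own statement) =====
-- stated objective: alternative
-- what changed: Replaces sorted(projects, key=rank) and the rank helper with stable successive partitioning: for each preferred slug in order, peel the still-unplaced projects containing it off the remaining list and append them to the result, then append the leftover; no rank function and no sort.
import Mathlib
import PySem

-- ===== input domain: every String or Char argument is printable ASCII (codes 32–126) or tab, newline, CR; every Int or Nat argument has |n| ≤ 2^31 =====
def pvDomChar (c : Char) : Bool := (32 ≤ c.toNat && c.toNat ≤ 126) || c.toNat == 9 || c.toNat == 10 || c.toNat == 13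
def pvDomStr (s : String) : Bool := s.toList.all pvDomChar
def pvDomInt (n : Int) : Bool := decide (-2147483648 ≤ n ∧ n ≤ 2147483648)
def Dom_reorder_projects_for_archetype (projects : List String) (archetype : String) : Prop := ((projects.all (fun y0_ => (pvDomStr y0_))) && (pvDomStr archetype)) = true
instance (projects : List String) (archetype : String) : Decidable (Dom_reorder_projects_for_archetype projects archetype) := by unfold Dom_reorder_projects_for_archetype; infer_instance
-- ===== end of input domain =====

-- B replaces A's comparison sort with a rank key by stable successive partitioning per slug (alternative decomposition, same observable result).

-- ===== PORT A =====
-- module-level constant ARCHETYPE_PROJECT_ORDER (shared by A and B, as in the Python module)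
def pvOrderDict : PySem.Dict String (List String) := PySem.Dict.ofList [
  ("ds-product",         ["legalize-co", "London Bible", "UN Speeches", "No botes", "ADCC", "ds-radar"]),
  ("data-analyst",       ["London Bible", "No botes", "UN Speeches", "legalize-co", "ds-radar", "ADCC"]),
  ("ml-engineer",        ["ds-radar", "legalize-co", "UN Speeches", "London Bible", "ADCC", "No botes"]),
  ("analytics-engineer", ["London Bible", "legalize-co", "UN Speeches", "ADCC", "No botes", "ds-radar"]),
  ("data-engineer",      ["legalize-co", "ds-radar", "No botes", "UN Speeches", "London Bible", "ADCC"]),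
  ("ai-engineer",        ["ds-radar", "legalize-co", "UN Speeches", "ADCC", "No botes", "London Bible"])]

-- A's nested 'rank' helper:
-- loop 'for i, slug in enumerate(slugs): if slug.lower() in p_lower: return i' then 'return len(slugs)'
def pvRankAux (pl : String) (n : Nat) : List String → Nat → Nat
  | [], _ => n
  | slug :: rest, i =>
      if PySem.Str.isIn (PySem.Str.lower slug) pl then i else pvRankAux pl n rest (i + 1)

def pvRank (slugs : List String) (p : String) : Nat :=
  pvRankAux (PySem.Str.lower p) slugs.length slugs 0

def reorder_projects_for_archetype (projects : List String) (archetype : String) : List String :=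
  let order := pvOrderDict.getD archetype (pvOrderDict.getD "ds-product" [])
  let slugs := order.map PySem.Str.lower
  PySem.List.sorted projects (pvRank slugs) false

-- ===== PORT B =====
-- one loop iteration of B: matched = [p for p in remaining if s in p.lower()]; remaining = the rest; result.extend(matched)
def pvPeel : (List String × List String) → String → (List String × List String)
  | (result, remaining), slug =>
      let s := PySem.Str.lower slug
      (result ++ remaining.filter (fun p => PySem.Str.isIn s (PySem.Str.lower p)),
       remaining.filter (fun p => !PySem.Str.isIn s (PySem.Str.lower p)))

def reorder_projects_for_archetype_alt (projects : List String) (archetype : String) : List String :=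
  let order := pvOrderDict.getD archetype (pvOrderDict.getD "ds-product" [])
  let rr := order.foldl pvPeel ([], projects)
  rr.1 ++ rr.2

-- ===== PRECONDITION & SPEC =====
def Spec_reorder_projects_for_archetype (projects : List String) (archetype : String) (out : List String) : Prop := out = reorder_projects_for_archetype_alt projects archetype
instance (projects : List String) (archetype : String) (out : List String) : Decidable (Spec_reorder_projects_for_archetype projects archetype out) := by unfold Spec_reorder_projects_for_archetype; infer_instance

-- ===== CLAIM (what is proved, stated in full; the proofs are below) =====
def Claim_equal_reorder_projects_for_archetype : Prop := ∀ (projects : List String) (archetype : String), Dom_reorder_projects_for_archetype projects archetype → Spec_reorder_projects_for_archetype projects archetype (reorder_projects_for_archetype projects archetype)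

-- ===== LEMMAS AND PROOFS =====

-- ASCII lowercasing is idempotent (A lowercases the already-lowercased slugs a second time)
theorem pvLowerChar_idem (c : Char) : PySem.Chars.lowerChar (PySem.Chars.lowerChar c) = PySem.Chars.lowerChar c := by
  unfold PySem.Chars.lowerChar PySem.Chars.isupper
  split_ifs with h1 h2 <;> try rfl
  exfalso
  simp only [Bool.and_eq_true, decide_eq_true_eq, Char.le_def, UInt32.le_iff_toNat_le] at h1 h2
  have hA : ('A' : Char).val.toNat = 65 := by decide
  have hZ : ('Z' : Char).val.toNat = 90 := by decide
  have hct : c.toNat = c.val.toNat := rfl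
  have hvalid : (c.toNat + 32).isValidChar := Or.inl (by omega)
  have hv : (Char.ofNat (c.toNat + 32)).val.toNat = c.toNat + 32 := by
    show (Char.ofNat (c.toNat + 32)).toNat = _
    rw [Char.toNat_ofNat, if_pos hvalid]
  omega

theorem pvLower_idem (s : String) : PySem.Str.lower (PySem.Str.lower s) = PySem.Str.lower s := by
  unfold PySem.Str.lower PySem.Chars.lower
  simp only [String.toList_ofList, List.map_map]
  congr 1
  exact List.map_congr_left (fun c _ => pvLowerChar_idem c)

-- ranking over the pre-lowered slugs is ranking over the originals
theorem pvRankAux_map_lower (pl : String) (n : Nat) (l : List String) (i : Nat) :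
    pvRankAux pl n (l.map PySem.Str.lower) i = pvRankAux pl n l i := by
  induction l generalizing i with
  | nil => rfl
  | cons s rest ih => simp only [List.map_cons, pvRankAux, pvLower_idem]; split <;> simp [ih]

theorem pvRank_map_lower (l : List String) (p : String) :
    pvRank (l.map PySem.Str.lower) p = pvRank l p := by
  unfold pvRank
  rw [List.length_map, pvRankAux_map_lower]

-- the rank is bounded by max of the fallback value and start index + remaining slugs
theorem pvRankAux_le (pl : String) (n : Nat) (l : List String) (i : Nat) :
    pvRankAux pl n l i ≤ max n (i + l.length) := by
  induction l generalizing i with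
  | nil => simp [pvRankAux]
  | cons s rest ih =>
      simp only [pvRankAux]
      split
      · omega
      · have := ih (i + 1); simp at this ⊢; omega

theorem pvRank_le (slugs : List String) (p : String) : pvRank slugs p ≤ slugs.length := by
  have := pvRankAux_le (PySem.Str.lower p) slugs.length slugs 0
  simpa using this

-- cons-step characterisation of the rank
theorem pvRankAux_succ (pl : String) (n : Nat) (l : List String) (i : Nat) :
    pvRankAux pl (n + 1) l (i + 1) = pvRankAux pl n l i + 1 := by
  induction l generalizing i with
  | nil => rfl
  | cons s rest ih => simp only [pvRankAux]; split <;> simp [ih]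

theorem pvRank_cons (s : String) (ss : List String) (p : String) :
    pvRank (s :: ss) p =
      if PySem.Str.isIn (PySem.Str.lower s) (PySem.Str.lower p) then 0 else pvRank ss p + 1 := by
  unfold pvRank
  simp only [List.length_cons, pvRankAux]
  split
  · rfl
  · exact pvRankAux_succ _ _ _ 0

-- insertBy skips a prefix it must not go before
theorem insertBy_append_left {α : Type} (before : α → α → Bool) (x : α)
    (ys zs : List α) (h : ∀ y ∈ ys, before x y = false) :
    PySem.List.insertBy before x (ys ++ zs) = ys ++ PySem.List.insertBy before x zs := by
  induction ys with
  | nil => simp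
  | cons y ys ih =>
      have hy : before x y = false := h y (by simp)
      simp only [List.cons_append, PySem.List.insertBy, hy]
      simp only [Bool.false_eq_true, if_false]
      rw [ih (fun z hz => h z (by simp [hz]))]

-- insertBy puts x in front when it goes before everything
theorem insertBy_front {α : Type} (before : α → α → Bool) (x : α)
    (ys : List α) (h : ∀ y ∈ ys, before x y = true) :
    PySem.List.insertBy before x ys = x :: ys := by
  cases ys with
  | nil => rfl
  | cons y ys => simp [PySem.List.insertBy, h y (by simp)]

-- canonical bucket form of a list under a bounded Nat key
def pvBuckets {α : Type} (key : α → Nat) (n : Nat) (xs : List α) : List (List α) :=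
  (List.range (n + 1)).map (fun i => xs.filter (fun x => key x == i))

-- A-side characterisation: Python's stable sort by a bounded Nat key is the bucket concatenation
theorem sorted_eq_flatten_buckets {α : Type} (key : α → Nat) (n : Nat) (xs : List α)
    (h : ∀ x ∈ xs, key x ≤ n) :
    PySem.List.sorted xs key false = (pvBuckets key n xs).flatten := by
  induction xs using List.reverseRecOn with
  | nil => simp [pvBuckets, PySem.List.sorted]
  | append_singleton xs x ih =>
      have hx : key x ≤ n := h x (by simp)
      have hxs : ∀ y ∈ xs, key y ≤ n := fun y hy => h y (by simp [hy])
      rw [PySem.List.sorted_eq_foldl_insertBy, List.foldl_append]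
      simp only [List.foldl_cons, List.foldl_nil]
      rw [← PySem.List.sorted_eq_foldl_insertBy, ih hxs]
      have hsplit : n + 1 = (key x + 1) + (n - key x) := by omega
      have hrange : List.range (n + 1) =
          List.range (key x + 1) ++ (List.range (n - key x)).map (fun j => key x + 1 + j) := by
        rw [hsplit, List.range_add]
      have hbuck : ∀ (ys : List α), (pvBuckets key n ys).flatten =
          (List.range (key x + 1)).flatMap (fun i => ys.filter (fun z => key z == i)) ++
          ((List.range (n - key x)).map (fun j => key x + 1 + j)).flatMap
            (fun i => ys.filter (fun z => key z == i)) := by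
        intro ys
        rw [pvBuckets, ← List.flatMap_def, hrange, List.flatMap_append]
      rw [hbuck, hbuck]
      set A := (List.range (key x + 1)).flatMap (fun i => xs.filter (fun z => key z == i)) with hA
      set C := ((List.range (n - key x)).map (fun j => key x + 1 + j)).flatMap
          (fun i => xs.filter (fun z => key z == i)) with hC
      have hmemA : ∀ y ∈ A, key y ≤ key x := by
        intro y hy
        rw [hA, List.mem_flatMap] at hy
        obtain ⟨i, hi, hyf⟩ := hy
        have := (List.mem_filter.mp hyf).2
        simp at this hi; omega
      have hmemC : ∀ y ∈ C, key x < key y := by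
        intro y hy
        rw [hC, List.mem_flatMap] at hy
        obtain ⟨i, hi, hyf⟩ := hy
        have := (List.mem_filter.mp hyf).2
        simp at this hi
        obtain ⟨j, _, hj⟩ := hi; omega
      rw [insertBy_append_left _ _ A C (fun y hy => by simp [Nat.not_lt.mpr (hmemA y hy)]),
          insertBy_front _ _ C (fun y hy => by simp [hmemC y hy])]
      have hCeq : ((List.range (n - key x)).map (fun j => key x + 1 + j)).flatMap
            (fun i => (xs ++ [x]).filter (fun z => key z == i)) = C := by
        rw [hC]
        apply List.flatMap_congr
        intro i hi
        simp at hi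
        obtain ⟨j, _, hj⟩ := hi
        rw [List.filter_append]
        have : (List.filter (fun z => key z == i) [x]) = [] := by
          simp; omega
        simp [this]
      have hAeq : (List.range (key x + 1)).flatMap
            (fun i => (xs ++ [x]).filter (fun z => key z == i)) = A ++ [x] := by
        rw [hA]
        have hr : List.range (key x + 1) = List.range (key x) ++ [key x] := by
          simp [List.range_succ]
        rw [hr, List.flatMap_append, List.flatMap_append]
        have h1 : (List.range (key x)).flatMap (fun i => (xs ++ [x]).filter (fun z => key z == i))
            = (List.range (key x)).flatMap (fun i => xs.filter (fun z => key z == i)) := by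
          apply List.flatMap_congr
          intro i hi
          simp at hi
          rw [List.filter_append]
          have : (List.filter (fun z => key z == i) [x]) = [] := by simp; omega
          simp [this]
        have h2 : ([key x] : List Nat).flatMap (fun i => (xs ++ [x]).filter (fun z => key z == i))
            = ([key x] : List Nat).flatMap (fun i => xs.filter (fun z => key z == i)) ++ [x] := by
          simp [List.filter_append]
        rw [h1, h2, List.append_assoc]
      rw [hCeq, hAeq]
      simp

-- B-side characterisation: the peel fold concatenates exactly the rank buckets
set_option maxHeartbeats 1000000 in
theorem peel_spec (ss : List String) (rs res : List String) :
    (ss.foldl pvPeel (res, rs)).1 ++ (ss.foldl pvPeel (res, rs)).2 =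
      res ++ (pvBuckets (pvRank ss) ss.length rs).flatten := by
  induction ss generalizing rs res with
  | nil =>
      have hkey : ∀ p, pvRank ([] : List String) p = 0 := fun p => rfl
      simp [pvBuckets, List.range_one, hkey]
  | cons s ss ih =>
      simp only [List.foldl_cons, pvPeel]
      rw [ih]
      rw [List.append_assoc]
      congr 1
      -- matched ++ flatten(buckets ss rest) = flatten(buckets (s::ss) rs)
      have hkey : ∀ p, pvRank (s :: ss) p =
          if PySem.Str.isIn (PySem.Str.lower s) (PySem.Str.lower p) then 0 else pvRank ss p + 1 :=
        pvRank_cons s ss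
      have hrange : List.range (ss.length + 1 + 1) =
          0 :: (List.range (ss.length + 1)).map Nat.succ := List.range_succ_eq_map
      unfold pvBuckets
      rw [← List.flatMap_def, ← List.flatMap_def, List.length_cons, hrange, List.flatMap_cons,
          List.flatMap_map]
      congr 1
      · -- bucket 0 is the matched list
        apply List.filter_congr
        intro p _
        simp only [hkey p]
        split <;> simp_all
      · -- bucket (i+1) over rs is bucket i over the rest
        apply List.flatMap_congr
        intro i _
        rw [List.filter_filter]
        apply List.filter_congr
        intro p _
        by_cases h : PySem.Chars.isIn (PySem.Chars.lower s.toList) (PySem.Chars.lower p.toList) = true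
        · simp [hkey p, h]
        · simp only [hkey p]
          simp [h]

-- ===== VERDICT (by name: the statement is the Claim_ definition above) =====
theorem reorder_projects_for_archetype_spec : Claim_equal_reorder_projects_for_archetype := by
  intro projects archetype _
  unfold Spec_reorder_projects_for_archetype reorder_projects_for_archetype reorder_projects_for_archetype_alt
  simp only []
  set order := pvOrderDict.getD archetype (pvOrderDict.getD "ds-product" []) with ho
  have hkeys : pvRank (order.map PySem.Str.lower) = pvRank order := funext (pvRank_map_lower order)
  have hb : ∀ p ∈ projects, pvRank (order.map PySem.Str.lower) p ≤ order.length := by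
    intro p _
    have := pvRank_le (order.map PySem.Str.lower) p
    simpa using this
  rw [sorted_eq_flatten_buckets (pvRank (order.map PySem.Str.lower)) order.length projects hb,
      hkeys, peel_spec]
  simp
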